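-- pv_equiv track=rewrite | github.com/duns-scotus/mlpy | tests/ml_integration/ml_debug/data_structures/list_ops.py | list_slice
-- ===== SOURCE A (Python) =====
-- def list_length(list):
--     count = 0
--     for item in list:
--         count = (count + 1)
--     return count
--
-- def list_slice(list, start, end):
--     result = []
--     i = start
--     while (i < end):
--         if ((i >= 0) and (i < list_length(list))):
--             result = (result + [list[i]])
--         i = (i + 1)
--     return result
-- ===== SOURCE B (Python) =====
-- def list_slice(list, start, end):
--     n = len(list)
--     lo = min(max(start, 0), n)
--     hi = min(max(end, 0), n)
--     return list[lo:hi]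
-- ===== Notes on version B (the rewrite author's own statement) =====
-- stated objective: simpler
-- what changed: Replaces the per-index bounds-checked while-loop (which recomputes the list length by a counting loop each iteration and appends one element at a time) with clamping start/end into [0, len] and returning a single slice.
import Mathlib
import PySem

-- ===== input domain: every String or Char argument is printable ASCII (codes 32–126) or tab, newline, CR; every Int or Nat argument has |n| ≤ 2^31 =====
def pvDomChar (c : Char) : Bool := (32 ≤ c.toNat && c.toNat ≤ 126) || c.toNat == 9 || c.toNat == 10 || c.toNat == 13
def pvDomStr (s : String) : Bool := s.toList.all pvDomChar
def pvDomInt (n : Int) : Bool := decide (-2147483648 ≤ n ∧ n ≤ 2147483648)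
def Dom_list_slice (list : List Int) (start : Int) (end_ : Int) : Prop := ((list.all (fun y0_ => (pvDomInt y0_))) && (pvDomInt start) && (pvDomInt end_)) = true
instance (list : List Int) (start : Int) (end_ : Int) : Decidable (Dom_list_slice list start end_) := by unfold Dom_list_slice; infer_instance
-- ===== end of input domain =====

-- B replaces A's per-index bounds-checked while loop (which recomputes the length by a
-- counting loop on every iteration) with clamping start/end into [0, len] and one slice.

-- ===== PORT A =====
-- helper list_length: counting loop
def listLengthA (l : List Int) : Int := l.foldl (fun count _ => count + 1) 0

-- the while loop of list_slice: state (i, result)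
def sliceLoopA (l : List Int) (end_ : Int) (i : Int) (result : List Int) : List Int :=
  if i < end_ then
    sliceLoopA l end_ (i + 1)
      (if 0 ≤ i ∧ i < listLengthA l then result ++ [PySem.List.pyGetD l i 0] else result)
  else result
termination_by (end_ - i).toNat
decreasing_by omega

def list_slice (list : List Int) (start : Int) (end_ : Int) : List Int :=
  sliceLoopA list end_ start []

-- ===== PORT B =====
def list_slice_alt (list : List Int) (start : Int) (end_ : Int) : List Int :=
  PySem.List.slice list (some (min (max start 0) (list.length : Int)))
                        (some (min (max end_ 0) (list.length : Int)))

-- ===== PRECONDITION & SPEC =====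
def Spec_list_slice (list : List Int) (start : Int) (end_ : Int) (out : List Int) : Prop := out = list_slice_alt list start end_
instance (list : List Int) (start : Int) (end_ : Int) (out : List Int) : Decidable (Spec_list_slice list start end_ out) := by unfold Spec_list_slice; infer_instance

-- ===== CLAIM (what is proved, stated in full; the proofs are below) =====
def Claim_equal_list_slice : Prop := ∀ (list : List Int) (start : Int) (end_ : Int), Dom_list_slice list start end_ → Spec_list_slice list start end_ (list_slice list start end_)

-- ===== LEMMAS AND PROOFS =====

theorem listLengthA_eq (l : List Int) : listLengthA l = (l.length : Int) := by
  have h : ∀ (l : List Int) (k : Int), l.foldl (fun count _ => count + 1) k = k + l.length := by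
    intro l
    induction l with
    | nil => simp
    | cons x xs ih => intro k; simp [List.foldl_cons, ih]; omega
  simpa using h l 0

-- the loop from i equals the accumulator followed by the elements with index in [max i 0, hi)
theorem sliceLoopA_eq (l : List Int) (end_ : Int) (i : Int) (result : List Int) :
    sliceLoopA l end_ i result =
      result ++ (l.drop (max i 0).toNat).take ((min (max end_ 0) (l.length : Int)).toNat - (max i 0).toNat) := by
  by_cases hlt : i < end_
  · rw [sliceLoopA]
    simp only [hlt, if_true]
    rw [sliceLoopA_eq l end_ (i + 1)]
    rw [listLengthA_eq]
    by_cases hin : 0 ≤ i ∧ i < (l.length : Int)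
    · rw [if_pos hin]
      have hi0 : (max i 0).toNat = i.toNat := by omega
      have hi1 : (max (i + 1) 0).toNat = i.toNat + 1 := by omega
      have hlen : i.toNat < l.length := by omega
      have hhi : i.toNat < (min (max end_ 0) (l.length : Int)).toNat := by omega
      rw [hi0, hi1]
      rw [List.append_assoc]
      congr 1
      rw [List.drop_eq_getElem_cons hlen]
      have hpg : PySem.List.pyGetD l i 0 = l[i.toNat] :=
        PySem.List.pyGetD_eq_getElem l 0 hin.1 hin.2
      rw [hpg]
      have : (min (max end_ 0) (l.length : Int)).toNat - i.toNat
           = ((min (max end_ 0) (l.length : Int)).toNat - (i.toNat + 1)) + 1 := by omega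
      rw [this, List.take_succ_cons]
      simp
    · rw [if_neg hin]
      rcases not_and_or.mp hin with hneg | hge
      · -- i < 0 : max i 0 = max (i+1) 0 = 0 unless i+1 arrives at... i ≤ -1 so i+1 ≤ 0
        have h0 : (max i 0).toNat = 0 := by omega
        have h1 : (max (i + 1) 0).toNat = 0 := by omega
        rw [h0, h1]
      · -- i ≥ length : both drops are [] and both takes are []
        have h0 : l.length ≤ (max i 0).toNat := by omega
        have h1 : l.length ≤ (max (i + 1) 0).toNat := by omega
        rw [List.drop_eq_nil_of_le h0, List.drop_eq_nil_of_le h1]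
        simp
  · rw [sliceLoopA]
    simp only [hlt, if_false]
    have : (min (max end_ 0) (l.length : Int)).toNat ≤ (max i 0).toNat := by omega
    rw [Nat.sub_eq_zero_of_le this]
    simp
termination_by (end_ - i).toNat
decreasing_by omega

-- ===== VERDICT (by name: the statement is the Claim_ definition above) =====
theorem list_slice_spec : Claim_equal_list_slice := by
  intro l start end_ _
  unfold Spec_list_slice list_slice list_slice_alt
  rw [sliceLoopA_eq]
  have hlo : (0 : Int) ≤ min (max start 0) (l.length : Int) := by omega
  have hhi : (0 : Int) ≤ min (max end_ 0) (l.length : Int) := by omega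
  rw [PySem.List.slice_toNat l hlo hhi]
  simp only [List.nil_append]
  by_cases hle : (max start 0).toNat ≤ l.length
  · have h1 : (min (max start 0) (l.length : Int)).toNat = (max start 0).toNat := by omega
    rw [h1]
  · have h2 : l.length ≤ (max start 0).toNat := by omega
    have h3 : (min (max start 0) (l.length : Int)).toNat = l.length := by omega
    rw [h3, List.drop_eq_nil_of_le h2, List.drop_length]
    simp
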